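-- pv_equiv track=rewrite | github.com/utkarshutr/LeetCodePractice | src/geeksforgeeks-potd/is_it_fibonacci/solution.py | solve
-- ===== SOURCE A (Python) =====
-- def solve(N, K, GeekNum):
--     sum = 0
--     for i in range(N):
--         if i >= K:
--             GeekNum.append(sum)
--             sum -= GeekNum[i-K]
--
--         sum += GeekNum[i]
--
--     return GeekNum[-1]
-- ===== SOURCE B (Python) =====
-- def solve(N, K, GeekNum):
--     for i in range(K, N):
--         GeekNum.append(sum(GeekNum[i - K:i]))
--     return GeekNum[-1]
-- ===== Notes on version B (the rewrite author's own statement) =====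
-- stated objective: simpler
-- what changed: Drops A's running-sum accumulator and its if-guard inside a range(N) loop; B loops i over range(K, N) and appends the freshly recomputed window sum sum(GeekNum[i-K:i]), which equals A's telescoped running sum; Pre_ excludes inputs where A raises IndexError, and inputs with a negative order K < 0 whose loop actually runs (K < N), where a negative order is meaningless and either returned value is accidental.
-- outside the precondition, e.g. on solve(2, -1, [5]): A returns 5, B returns 0; on solve(0, -2, [1, 2, 3]): A returns 3, B returns 5
import Mathlib
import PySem

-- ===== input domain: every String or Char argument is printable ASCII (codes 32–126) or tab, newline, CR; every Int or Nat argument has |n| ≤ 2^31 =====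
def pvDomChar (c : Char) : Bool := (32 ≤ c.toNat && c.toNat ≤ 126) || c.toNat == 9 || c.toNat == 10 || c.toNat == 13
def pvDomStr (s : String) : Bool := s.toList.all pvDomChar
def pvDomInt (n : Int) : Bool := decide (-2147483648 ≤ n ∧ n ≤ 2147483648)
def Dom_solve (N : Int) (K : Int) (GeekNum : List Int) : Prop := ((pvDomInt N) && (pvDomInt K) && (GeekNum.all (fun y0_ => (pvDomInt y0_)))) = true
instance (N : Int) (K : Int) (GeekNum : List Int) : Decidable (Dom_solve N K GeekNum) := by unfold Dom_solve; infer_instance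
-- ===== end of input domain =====

-- B replaces A's running-sum accumulator by re-summing the K-term window with a slice each step:
-- simpler (no accumulator, no if-guard), not faster. Both Pythons append the same N-K terms to
-- GeekNum in place; the theorems are about the return value.

-- Both ports keep the Python list as an Array Int (constant-time append and indexing, like a
-- Python list); pyArrGet/pyArrSlice are exact on every admitted input: pyArrGet_eq/pyArrSlice_eq
-- below prove them equal to PySem.List.pyGetD / PySem.List.slice on the array's elements.

-- g[i] with Python index semantics (negative wraparound), 0 exactly where Python raises IndexError
def pyArrGet (g : Array Int) (i : Int) : Int :=
  if 0 ≤ i then (if i < (g.size : Int) then g.getD i.toNat 0 else 0)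
  else (if -(g.size : Int) ≤ i then g.getD (g.size - (-i).toNat) 0 else 0)

-- the slice g[a:b] (clamped exactly as Python clamps)
def pyArrSlice (g : Array Int) (a b : Int) : List Int :=
  let lo := PySem.List.clampIdx g.size a
  let hi := PySem.List.clampIdx g.size b
  (List.range (hi - lo)).map (fun j => g.getD (lo + j) 0)

-- ===== PORT A =====
def stepA (K : Int) (st : Array Int × Int) (i : Int) : Array Int × Int :=
  let p : Array Int × Int :=
    if i ≥ K then
      let g := st.1.push st.2
      (g, st.2 - pyArrGet g (i - K))
    else (st.1, st.2)
  (p.1, p.2 + pyArrGet p.1 i)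

def solve (N : Int) (K : Int) (GeekNum : List Int) : Int :=
  let st := (PySem.List.pyRange 0 N 1).foldl (stepA K) (GeekNum.toArray, 0)
  pyArrGet st.1 (-1)

-- ===== PORT B =====
def stepB (K : Int) (g : Array Int) (i : Int) : Array Int :=
  g.push (pyArrSlice g (i - K) i).sum

def solve_alt (N : Int) (K : Int) (GeekNum : List Int) : Int :=
  let g := (PySem.List.pyRange K N 1).foldl (stepB K) GeekNum.toArray
  pyArrGet g (-1)

-- ===== PRECONDITION & SPEC =====
-- Pre_ excludes (a) inputs where A raises IndexError (too-short GeekNum, or an empty final list),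
-- and (b) K < 0 with a non-empty loop (K < N): a negative order is outside the function's meaning
-- and a value returned there by either program is accidental.
def Pre_solve (N : Int) (K : Int) (GeekNum : List Int) : Prop :=
  (N ≤ 0 ∧ GeekNum ≠ [] ∧ (0 ≤ K ∨ N ≤ K)) ∨ (0 < N ∧ 0 ≤ K ∧ min N K ≤ (GeekNum.length : Int))
instance (N : Int) (K : Int) (GeekNum : List Int) : Decidable (Pre_solve N K GeekNum) := by
  unfold Pre_solve; infer_instance

def pvWitness_solve : Int × Int × List Int := (6, 2, [1, 1])

def Spec_solve (N : Int) (K : Int) (GeekNum : List Int) (out : Int) : Prop := out = solve_alt N K GeekNum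
instance (N : Int) (K : Int) (GeekNum : List Int) (out : Int) : Decidable (Spec_solve N K GeekNum out) := by unfold Spec_solve; infer_instance

-- ===== CLAIM (what is proved, stated in full; the proofs are below) =====
def Claim_equal_solve : Prop := ∀ (N : Int) (K : Int) (GeekNum : List Int), Dom_solve N K GeekNum → Pre_solve N K GeekNum → Spec_solve N K GeekNum (solve N K GeekNum)

-- ===== LEMMAS AND PROOFS =====

-- list-level models of the two loop bodies (the ports act on arrays; toList carries one to the other)
def stepAL (K : Int) (st : List Int × Int) (i : Int) : List Int × Int :=
  let p : List Int × Int :=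
    if i ≥ K then
      let g := st.1 ++ [st.2]
      (g, st.2 - PySem.List.pyGetD g (i - K) 0)
    else (st.1, st.2)
  (p.1, p.2 + PySem.List.pyGetD p.1 i 0)

def stepBL (K : Int) (g : List Int) (i : Int) : List Int :=
  g ++ [(PySem.List.slice g (some (i - K)) (some i)).sum]

lemma arrGetD_eq (g : Array Int) (j : Nat) : g.getD j 0 = g.toList.getD j 0 := by
  unfold Array.getD
  split
  · rename_i h
    rw [List.getD_eq_getElem _ _ (by simpa using h)]
    simp
  · rename_i h
    rw [List.getD_eq_default]
    simpa using h

lemma pyArrGet_eq (g : Array Int) (i : Int) : pyArrGet g i = PySem.List.pyGetD g.toList i 0 := by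
  unfold pyArrGet PySem.List.pyGetD PySem.List.pyGet? PySem.List.pyIdx?
  simp only [Array.length_toList, arrGetD_eq]
  by_cases h0 : 0 ≤ i
  · by_cases h1 : i < (g.size : Int) <;>
      simp [h0, h1, List.getD]
  · by_cases h2 : -(g.size : Int) ≤ i <;>
      simp [h0, h2, List.getD]

lemma pyArrSlice_eq (g : Array Int) (a b : Int) :
    pyArrSlice g a b = PySem.List.slice g.toList (some a) (some b) := by
  unfold pyArrSlice PySem.List.slice
  simp only [Array.length_toList, arrGetD_eq]
  set lo := PySem.List.clampIdx g.size a with hlo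
  set hi := PySem.List.clampIdx g.size b with hhi
  have hhl : hi ≤ g.toList.length := by
    rw [Array.length_toList]; exact PySem.List.clampIdx_le _ _
  -- both sides are the window [lo, lo + (hi - lo)) of g.toList
  have key : ∀ (l : List Int) (lo n : Nat), lo + n ≤ l.length →
      (List.range n).map (fun j => l.getD (lo + j) 0) = (l.drop lo).take n := by
    intro l lo n
    induction n with
    | zero => simp
    | succ n ih =>
      intro hn
      have hln : lo + n < l.length := by omega
      have hdn : n < (l.drop lo).length := by simp; omega
      rw [List.range_succ, List.map_append, ih (by omega)]
      have : (l.drop lo).take (n+1) = (l.drop lo).take n ++ [(l.drop lo)[n]'hdn] := by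
        rw [List.take_add_one]
        simp [List.getElem?_eq_getElem hdn]
      rw [this]
      simp [List.getElem_drop, List.getElem?_eq_getElem hln]
  have hll : lo ≤ g.toList.length := by
    rw [Array.length_toList]; exact PySem.List.clampIdx_le _ _
  exact key g.toList lo (hi - lo) (by omega)

lemma stepA_hom (K i : Int) (st : Array Int × Int) :
    stepAL K (st.1.toList, st.2) i = ((stepA K st i).1.toList, (stepA K st i).2) := by
  unfold stepAL stepA
  by_cases h : i ≥ K <;>
    simp [h, pyArrGet_eq, Array.toList_push]

lemma stepB_hom (K i : Int) (g : Array Int) :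
    stepBL K g.toList i = (stepB K g i).toList := by
  unfold stepBL stepB
  rw [Array.toList_push, pyArrSlice_eq]

lemma solve_eq_list (N K : Int) (G : List Int) :
    solve N K G = PySem.List.pyGetD ((PySem.List.pyRange 0 N 1).foldl (stepAL K) (G, 0)).1 (-1) 0 := by
  unfold solve
  rw [pyArrGet_eq]
  have h := List.foldl_hom (f := fun st : Array Int × Int => (st.1.toList, st.2))
    (g₁ := stepA K) (g₂ := stepAL K) (l := PySem.List.pyRange 0 N 1)
    (init := (G.toArray, 0)) (fun st i => stepA_hom K i st)
  rw [h]

lemma solve_alt_eq_list (N K : Int) (G : List Int) :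
    solve_alt N K G = PySem.List.pyGetD ((PySem.List.pyRange K N 1).foldl (stepBL K) G) (-1) 0 := by
  unfold solve_alt
  rw [pyArrGet_eq]
  have h := List.foldl_hom (f := Array.toList)
    (g₁ := stepB K) (g₂ := stepBL K) (l := PySem.List.pyRange K N 1)
    (init := G.toArray) (fun g i => stepB_hom K i g)
  rw [h]

-- shifting a k-term window one step to the right
lemma window_shift (L : List Int) (j k : Nat) (h : j + k < L.length) :
    ((L.drop (j+1)).take k).sum
      = ((L.drop j).take k).sum - L[j]'(by omega) + L[j+k]'h := by
  cases k with
  | zero => simp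
  | succ k =>
    have hj : j < L.length := by omega
    have hdrop : L.drop j = L[j] :: L.drop (j+1) := List.drop_eq_getElem_cons hj
    have hk : k < (L.drop (j+1)).length := by simp; omega
    have htake : ((L.drop (j+1)).take (k+1)).sum
        = ((L.drop (j+1)).take k).sum + (L.drop (j+1))[k]'hk :=
      List.sum_take_succ _ _ hk
    have hget : (L.drop (j+1))[k]'hk = L[j+(k+1)]'h := by
      simp [List.getElem_drop]; congr 1; omega
    have hcons : ((L.drop j).take (k+1)).sum
        = L[j] + ((L.drop (j+1)).take k).sum := by
      rw [hdrop, List.take_succ_cons]; simp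
    rw [htake, hcons, hget]
    ring

-- phase 1: while i < K, A's list is unchanged and its sum is the prefix sum
lemma phaseA1 (G : List Int) (k : Nat) (m : Nat) (hm : m ≤ k) (hlen : m ≤ G.length) :
    ((List.range m).map (fun j : Nat => ((0:Int) + (j:Int)))).foldl (stepAL (k:Int)) (G, 0)
      = (G, (G.take m).sum) := by
  induction m with
  | zero => simp
  | succ m ih =>
    have hml : m < G.length := by omega
    have hsome : G[m]? = some (G[m]'hml) := List.getElem?_eq_getElem hml
    rw [List.range_succ, List.map_append, List.foldl_append, ih (by omega) (by omega)]
    have htake : (G.take (m+1)).sum = (G.take m).sum + G[m]'hml :=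
      List.sum_take_succ _ _ hml
    simp [stepAL, show ¬ k ≤ m by omega, hsome, htake]

-- phase 2: step-by-step, A's state is B's list together with the current window sum
lemma phase2 (G : List Int) (k : Nat) (hk : k ≤ G.length) (m : Nat) :
    (((List.range m).map (fun j : Nat => ((k:Int) + (j:Int)))).foldl (stepBL (k:Int)) G).length
        = G.length + m
    ∧ ((List.range m).map (fun j : Nat => ((k:Int) + (j:Int)))).foldl (stepAL (k:Int)) (G, (G.take k).sum)
        = (((List.range m).map (fun j : Nat => ((k:Int) + (j:Int)))).foldl (stepBL (k:Int)) G,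
           (((((List.range m).map (fun j : Nat => ((k:Int) + (j:Int)))).foldl (stepBL (k:Int)) G).drop m).take k).sum) := by
  induction m with
  | zero => exact ⟨by simp, by simp⟩
  | succ m ih =>
    obtain ⟨ihlen, iheq⟩ := ih
    set h := ((List.range m).map (fun j : Nat => ((k:Int) + (j:Int)))).foldl (stepBL (k:Int)) G with hh
    set s := ((h.drop m).take k).sum with hs
    have hstepB : stepBL (k:Int) h ((k:Int) + (m:Int)) = h ++ [s] := by
      have hwin : PySem.List.slice h (some ((m:Nat):Int)) (some (((m:Nat):Int) + ((k:Nat):Int)))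
          = (h.drop m).take k := PySem.List.slice_natCast_add h m k
      unfold stepBL
      rw [show ((k:Int) + (m:Int) - (k:Int)) = ((m:Nat):Int) from by omega,
          show ((k:Int) + (m:Int)) = ((m:Nat):Int) + ((k:Nat):Int) from by omega, hwin]
    simp only [List.range_succ, List.map_append, List.foldl_append, List.map_cons,
      List.map_nil, List.foldl_cons, List.foldl_nil, iheq]
    rw [← hh, hstepB]
    have hlen1 : (h ++ [s]).length = G.length + m + 1 := by simp [ihlen]
    refine ⟨by omega, ?_⟩
    have hm1 : m < (h ++ [s]).length := by omega
    have hmk : m + k < (h ++ [s]).length := by omega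
    have hg1 : PySem.List.pyGetD (h ++ [s]) ((k:Int) + (m:Int) - (k:Int)) 0
        = (h ++ [s])[m]'hm1 := by
      rw [show ((k:Int) + (m:Int) - (k:Int)) = ((m:Nat):Int) from by omega,
          PySem.List.pyGetD_natCast, List.getD_eq_getElem _ _ hm1]
    have hg2 : PySem.List.pyGetD (h ++ [s]) ((k:Int) + (m:Int)) 0
        = (h ++ [s])[m+k]'hmk := by
      rw [show ((k:Int) + (m:Int)) = (((m+k:Nat)):Int) from by push_cast; ring,
          PySem.List.pyGetD_natCast, List.getD_eq_getElem _ _ hmk]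
    have hshift := window_shift (h ++ [s]) m k (by omega)
    have hkeep : (((h ++ [s]).drop m).take k) = (h.drop m).take k := by
      rw [List.drop_append_of_le_length (by omega)]
      exact List.take_append_of_le_length (by simp; omega)
    simp only [stepAL, ge_iff_le, if_pos (show (k:Int) ≤ (k:Int) + (m:Int) by omega), hg1, hg2]
    refine Prod.ext rfl ?_
    simp only [hshift, hkeep, ← hs]

lemma ranges_eq (a b : Int) :
    PySem.List.pyRange a b 1 = (List.range (b - a).toNat).map (fun j : Nat => a + (j:Int)) := by
  rw [PySem.List.pyRange_one]

-- ===== VERDICT (by name: the statement is the Claim_ definition above) =====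
theorem solve_spec : Claim_equal_solve := by
  intro N K G _ hpre
  unfold Spec_solve
  rw [solve_eq_list, solve_alt_eq_list]
  rcases hpre with ⟨hN, -, hK⟩ | ⟨hN, hK, hNK⟩
  · -- N ≤ 0 and K ≥ min(N,0): both loops are empty
    rw [PySem.List.pyRange_one_eq_nil hN, PySem.List.pyRange_one_eq_nil (by omega : N ≤ K)]
    rfl
  · -- 0 < N
    obtain ⟨k, hk⟩ : ∃ k : Nat, K = (k : Int) := ⟨K.toNat, by omega⟩
    subst hk
    rcases le_or_gt N (k:Int) with hle | hlt
    · -- 0 < N ≤ K: A never appends, B's loop is empty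
      rw [PySem.List.pyRange_one_eq_nil (a := (k:Int)) hle, ranges_eq 0 N]
      rw [show (N - 0).toNat = N.toNat by omega,
          phaseA1 G k N.toNat (by omega) (by omega)]
      rfl
    · -- K < N: split A's range at K
      have hklen : k ≤ G.length := by omega
      rw [PySem.List.pyRange_one_append 0 (k:Int) N (by omega) (by omega),
          List.foldl_append]
      rw [ranges_eq 0 (k:Int), show ((k:Int) - 0).toNat = k by omega,
          phaseA1 G k k (le_refl k) hklen]
      rw [ranges_eq (k:Int) N]
      obtain ⟨-, heq⟩ := phase2 G k hklen (N - (k:Int)).toNat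
      rw [heq]
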